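-- pv_equiv track=rewrite | github.com/qianzii2/Z1DB | storage/compression/delta.py | delta_of_delta_decode
-- ===== SOURCE A (Python) =====
-- def delta_of_delta_decode(base: int, first_delta: int, dod: list) -> list:
--     if not dod:
--         return [base]
--     result = [base, base + first_delta]
--     delta = first_delta
--     for i in range(2, len(dod)):
--         delta += dod[i]
--         result.append(result[-1] + delta)
--     return result
-- ===== SOURCE B (Python) =====
-- def delta_of_delta_decode(base: int, first_delta: int, dod: list) -> list:
--     if not dod:
--         return [base]
--     # pass 1: reconstruct the delta stream (dod[0] and dod[1] are headers, unused)
--     deltas = [first_delta]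
--     for x in dod[2:]:
--         deltas.append(deltas[-1] + x)
--     # pass 2: prefix-sum the deltas onto base
--     out = [base]
--     acc = base
--     for d in deltas:
--         acc += d
--         out.append(acc)
--     return out
-- ===== Notes on version B (the rewrite author's own statement) =====
-- stated objective: alternative
-- what changed: Replaces A's single fused loop that maintains delta and result[-1] together with two separate cumulative passes: first materialise the delta stream from the delta-of-deltas, then prefix-sum it onto base.
import Mathlib
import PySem

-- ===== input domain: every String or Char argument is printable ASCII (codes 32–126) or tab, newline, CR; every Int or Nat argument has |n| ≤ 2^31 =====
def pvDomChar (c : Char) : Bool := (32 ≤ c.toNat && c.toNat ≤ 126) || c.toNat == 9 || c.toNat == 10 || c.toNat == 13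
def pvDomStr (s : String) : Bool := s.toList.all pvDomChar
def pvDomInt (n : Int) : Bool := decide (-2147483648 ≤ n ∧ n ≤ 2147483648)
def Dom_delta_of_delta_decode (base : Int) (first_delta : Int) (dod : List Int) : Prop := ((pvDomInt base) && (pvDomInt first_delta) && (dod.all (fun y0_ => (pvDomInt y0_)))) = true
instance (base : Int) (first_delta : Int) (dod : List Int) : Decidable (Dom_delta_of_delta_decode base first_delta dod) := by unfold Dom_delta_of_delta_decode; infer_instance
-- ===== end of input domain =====

-- B replaces A's single fused loop (delta and result[-1] maintained together) with two
-- separate cumulative passes: build the delta stream, then prefix-sum it onto base.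

-- ===== PORT A =====
-- literal port of A: result = [base, base+first_delta]; delta = first_delta;
-- for i in range(2, len(dod)): delta += dod[i]; result.append(result[-1] + delta)
def delta_of_delta_decode (base : Int) (first_delta : Int) (dod : List Int) : List Int :=
  if dod = [] then [base]
  else
    let st := (PySem.List.pyRange 2 dod.length 1).foldl
      (fun (st : List Int × Int) i =>
        let delta := st.2 + PySem.List.pyGetD dod i 0
        (st.1 ++ [PySem.List.pyGetD st.1 (-1) 0 + delta], delta))
      ([base, base + first_delta], first_delta)
    st.1

-- ===== PORT B =====
-- literal port of B: pass 1 builds deltas from dod[2:], pass 2 prefix-sums them onto base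
def delta_of_delta_decode_alt (base : Int) (first_delta : Int) (dod : List Int) : List Int :=
  if dod = [] then [base]
  else
    let deltas := (PySem.List.slice dod (some 2) none).foldl
      (fun ds x => ds ++ [PySem.List.pyGetD ds (-1) 0 + x]) [first_delta]
    let out := deltas.foldl
      (fun (st : List Int × Int) d => (st.1 ++ [st.2 + d], st.2 + d)) ([base], base)
    out.1

-- ===== PRECONDITION & SPEC =====
def Spec_delta_of_delta_decode (base : Int) (first_delta : Int) (dod : List Int) (out : List Int) : Prop := out = delta_of_delta_decode_alt base first_delta dod
instance (base : Int) (first_delta : Int) (dod : List Int) (out : List Int) : Decidable (Spec_delta_of_delta_decode base first_delta dod out) := by unfold Spec_delta_of_delta_decode; infer_instance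

-- ===== CLAIM (what is proved, stated in full; the proofs are below) =====
def Claim_equal_delta_of_delta_decode : Prop := ∀ (base : Int) (first_delta : Int) (dod : List Int), Dom_delta_of_delta_decode base first_delta dod → Spec_delta_of_delta_decode base first_delta dod (delta_of_delta_decode base first_delta dod)

-- ===== LEMMAS AND PROOFS =====

-- reference shape of B's first pass
def specDeltas (d : Int) : List Int → List Int
  | [] => [d]
  | x :: xs => d :: specDeltas (d + x) xs

-- reference shape of B's second pass
def specOut (acc : Int) : List Int → List Int
  | [] => []
  | d :: ys => (acc + d) :: specOut (acc + d) ys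

-- reference shape of A's fused loop (v = current last element, d = current delta)
def specA (v d : Int) : List Int → List Int
  | [] => []
  | x :: xs => (v + (d + x)) :: specA (v + (d + x)) (d + x) xs

theorem foldl_deltas (xs : List Int) (pre : List Int) (d : Int) :
    xs.foldl (fun ds x => ds ++ [PySem.List.pyGetD ds (-1) 0 + x]) (pre ++ [d])
      = pre ++ specDeltas d xs := by
  induction xs generalizing pre d with
  | nil => simp [specDeltas]
  | cons x xs ih =>
    simp only [List.foldl_cons, PySem.List.pyGetD_neg_one_append_singleton]
    have : pre ++ [d] ++ [d + x] = (pre ++ [d]) ++ [d + x] := by simp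
    rw [this, ih (pre ++ [d]) (d + x)]
    simp [specDeltas]

theorem foldl_out (ys : List Int) (pre : List Int) (acc : Int) :
    (ys.foldl (fun (st : List Int × Int) d => (st.1 ++ [st.2 + d], st.2 + d)) (pre, acc)).1
      = pre ++ specOut acc ys := by
  induction ys generalizing pre acc with
  | nil => simp [specOut]
  | cons d ys ih =>
    simp only [List.foldl_cons]
    rw [ih (pre ++ [acc + d]) (acc + d)]
    simp [specOut]

theorem foldl_A (xs : List Int) (pre : List Int) (v d : Int) :
    (xs.foldl
        (fun (st : List Int × Int) x =>
          let delta := st.2 + x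
          (st.1 ++ [PySem.List.pyGetD st.1 (-1) 0 + delta], delta))
        (pre ++ [v], d)).1
      = pre ++ v :: specA v d xs := by
  induction xs generalizing pre v d with
  | nil => simp [specA]
  | cons x xs ih =>
    simp only [List.foldl_cons, PySem.List.pyGetD_neg_one_append_singleton]
    have : pre ++ [v] ++ [v + (d + x)] = (pre ++ [v]) ++ [v + (d + x)] := by simp
    rw [this, ih (pre ++ [v]) (v + (d + x)) (d + x)]
    simp [specA]

theorem specOut_specDeltas (xs : List Int) (v d : Int) :
    specOut v (specDeltas d xs) = (v + d) :: specA (v + d) d xs := by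
  induction xs generalizing v d with
  | nil => simp [specDeltas, specOut, specA]
  | cons x xs ih =>
    simp only [specDeltas, specOut, specA, ih]

-- ===== VERDICT (by name: the statement is the Claim_ definition above) =====
theorem delta_of_delta_decode_spec : Claim_equal_delta_of_delta_decode := by
  intro base first_delta dod _
  unfold Spec_delta_of_delta_decode delta_of_delta_decode delta_of_delta_decode_alt
  by_cases h : dod = []
  · simp [h]
  · simp only [h, if_false]
    have h2 : (2:Int).toNat = 2 := rfl
    have hrange := PySem.List.foldl_pyRange_pyGetD' dod 0
      (fun (st : List Int × Int) (x : Int) =>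
        (st.1 ++ [PySem.List.pyGetD st.1 (-1) 0 + (st.2 + x)], st.2 + x))
      ([base, base + first_delta], first_delta) (a := 2) (by norm_num)
    rw [h2] at hrange
    rw [show (List.foldl
        (fun (st : List Int × Int) i =>
          let delta := st.2 + PySem.List.pyGetD dod i 0
          (st.1 ++ [PySem.List.pyGetD st.1 (-1) 0 + delta], delta))
        ([base, base + first_delta], first_delta) (PySem.List.pyRange 2 (dod.length : Int) 1))
      = (List.foldl
        (fun (st : List Int × Int) x =>
          (st.1 ++ [PySem.List.pyGetD st.1 (-1) 0 + (st.2 + x)], st.2 + x))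
        ([base, base + first_delta], first_delta) (List.drop 2 dod)) from hrange]
    rw [PySem.List.slice_from dod (by norm_num : (0:Int) ≤ 2), h2]
    have hA := foldl_A (dod.drop 2) [base] (base + first_delta) first_delta
    simp only [List.cons_append, List.nil_append] at hA
    rw [hA]
    have hD := foldl_deltas (dod.drop 2) [] first_delta
    simp only [List.nil_append] at hD
    rw [hD]
    have hO := foldl_out (specDeltas first_delta (dod.drop 2)) [base] base
    rw [hO, specOut_specDeltas]
    simp
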